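-- pv_equiv track=rewrite | github.com/wkazmierczak/Introduction_to_Computer_Science_AGH_UST_course | zestaw_3/zad_16.py | biggest_lowest
-- ===== SOURCE A (Python) =====
-- def biggest_lowest(tab):
--     lowest = tab[0]
--     biggest = tab[0]
--     for element in tab:
--         if element > biggest:
--             biggest = element
--         if element < lowest:
--             lowest = element
--     if tab.count(lowest) == tab.count(biggest) == 1:
--         return True
--     else:
--         return False
-- ===== SOURCE B (Python) =====
-- def biggest_lowest(tab):
--     s = sorted(tab)
--     return (len(s) == 1 or s[0] != s[1]) and (len(s) == 1 or s[-1] != s[-2])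
-- ===== Notes on version B (the rewrite author's own statement) =====
-- stated objective: simpler
-- what changed: Replaces the min/max scan plus two count() scans with one sort followed by constant-time neighbour comparisons at both ends of the sorted list.
import Mathlib
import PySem

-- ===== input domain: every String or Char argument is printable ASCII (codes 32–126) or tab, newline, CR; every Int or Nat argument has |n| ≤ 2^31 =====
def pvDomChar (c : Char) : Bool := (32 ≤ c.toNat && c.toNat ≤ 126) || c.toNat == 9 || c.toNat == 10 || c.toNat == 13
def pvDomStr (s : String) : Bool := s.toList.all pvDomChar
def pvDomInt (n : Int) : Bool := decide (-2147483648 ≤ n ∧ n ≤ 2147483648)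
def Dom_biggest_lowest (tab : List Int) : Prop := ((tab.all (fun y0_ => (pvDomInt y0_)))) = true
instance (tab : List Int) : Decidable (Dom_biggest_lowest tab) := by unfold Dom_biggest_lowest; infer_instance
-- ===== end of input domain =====

-- B replaces the min/max scan plus two count() scans by one sort and neighbour checks at both ends (objective: simpler).

-- ===== PORT A =====
def biggest_lowest (tab : List Int) : Bool :=
  match PySem.List.pyGet? tab 0 with
  | none => false  -- tab[0] raises IndexError on []; excluded by Pre_
  | some h =>
    let p := tab.foldl (fun (p : Int × Int) e =>
      (if e < p.1 then e else p.1, if e > p.2 then e else p.2)) (h, h)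
    decide (PySem.List.count tab p.1 = PySem.List.count tab p.2 ∧ PySem.List.count tab p.2 = 1)

-- ===== PORT B =====
def pvEndsDistinct (s : List Int) : Bool :=
  ((s.length == 1) || (PySem.List.pyGet? s 0 != PySem.List.pyGet? s 1)) &&
  ((s.length == 1) || (PySem.List.pyGet? s (-1) != PySem.List.pyGet? s (-2)))

def biggest_lowest_alt (tab : List Int) : Bool :=
  pvEndsDistinct (PySem.List.sorted tab (fun x => x) false)

-- ===== PRECONDITION & SPEC =====
-- A (and B) raise IndexError on the empty list.
def Pre_biggest_lowest (tab : List Int) : Prop := tab ≠ []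
instance (tab : List Int) : Decidable (Pre_biggest_lowest tab) := by unfold Pre_biggest_lowest; infer_instance
def pvWitness_biggest_lowest : List Int := ([1, 2, 2, 3])

def Spec_biggest_lowest (tab : List Int) (out : Bool) : Prop := out = biggest_lowest_alt tab
instance (tab : List Int) (out : Bool) : Decidable (Spec_biggest_lowest tab out) := by unfold Spec_biggest_lowest; infer_instance

-- ===== CLAIM (what is proved, stated in full; the proofs are below) =====
def Claim_equal_biggest_lowest : Prop := ∀ (tab : List Int), Dom_biggest_lowest tab → Pre_biggest_lowest tab → Spec_biggest_lowest tab (biggest_lowest tab)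

-- ===== LEMMAS AND PROOFS =====

-- A's fold over the pair is the pair of min/max folds.
theorem pv_foldl_pair (t : List Int) (a b : Int) :
    t.foldl (fun (p : Int × Int) e =>
      (if e < p.1 then e else p.1, if e > p.2 then e else p.2)) (a, b)
      = (t.foldl min a, t.foldl max b) := by
  induction t generalizing a b with
  | nil => rfl
  | cons x t ih =>
      have h1 : (if x < a then x else a) = min a x := by rw [min_def]; split_ifs <;> omega
      have h2 : (if b < x then x else b) = max b x := by rw [max_def]; split_ifs <;> omega
      simp only [List.foldl_cons, h1, h2, ih]

theorem pv_foldl_min_le_init (t : List Int) (a : Int) : t.foldl min a ≤ a := by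
  induction t generalizing a with
  | nil => exact le_refl a
  | cons x t ih => exact le_trans (ih (min a x)) (min_le_left a x)

theorem pv_foldl_min_le (t : List Int) (a : Int) : ∀ y ∈ t, t.foldl min a ≤ y := by
  induction t generalizing a with
  | nil => intro y hy; cases hy
  | cons x t ih =>
      intro y hy
      rcases List.mem_cons.1 hy with rfl | hy
      · exact le_trans (pv_foldl_min_le_init t (min a y)) (min_le_right a y)
      · exact ih (min a x) y hy

theorem pv_foldl_min_mem (t : List Int) (a : Int) : t.foldl min a = a ∨ t.foldl min a ∈ t := by
  induction t generalizing a with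
  | nil => exact Or.inl rfl
  | cons x t ih =>
      rcases ih (min a x) with h | h
      · rw [List.foldl_cons, h, min_def]
        split_ifs with hax
        · exact Or.inl rfl
        · exact Or.inr (List.mem_cons_self)
      · exact Or.inr (List.mem_cons_of_mem x h)

theorem pv_foldl_max_ge_init (t : List Int) (a : Int) : a ≤ t.foldl max a := by
  induction t generalizing a with
  | nil => exact le_refl a
  | cons x t ih => exact le_trans (le_max_left a x) (ih (max a x))

theorem pv_foldl_max_ge (t : List Int) (a : Int) : ∀ y ∈ t, y ≤ t.foldl max a := by
  induction t generalizing a with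
  | nil => intro y hy; cases hy
  | cons x t ih =>
      intro y hy
      rcases List.mem_cons.1 hy with rfl | hy
      · exact le_trans (le_max_right a y) (pv_foldl_max_ge_init t (max a y))
      · exact ih (max a x) y hy

theorem pv_foldl_max_mem (t : List Int) (a : Int) : t.foldl max a = a ∨ t.foldl max a ∈ t := by
  induction t generalizing a with
  | nil => exact Or.inl rfl
  | cons x t ih =>
      rcases ih (max a x) with h | h
      · rw [List.foldl_cons, h, max_def]
        split_ifs with hax
        · exact Or.inr (List.mem_cons_self)
        · exact Or.inl rfl
      · exact Or.inr (List.mem_cons_of_mem x h)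

-- In a sorted list s = m :: b :: r, the minimum m occurs once iff its neighbour b differs.
theorem pv_count_head (xs : List Int) (m b : Int) (r : List Int)
    (hs : PySem.List.sorted xs (fun x => x) false = m :: b :: r) :
    (List.count m (m :: b :: r) = 1 ↔ b ≠ m) := by
  have hlen : (PySem.List.sorted xs (fun x => x) false).length = r.length + 2 := by
    rw [hs]; simp
  have hmb : m ≤ b := by
    have := PySem.List.sorted_id_getElem_mono xs (p := 0) (q := 1) (by omega) (by omega)
    simpa [hs] using this
  have hnotmem : b ≠ m → m ∉ b :: r := by
    intro hbm hmem
    rcases List.mem_cons.1 hmem with h1 | h1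
    · exact hbm h1.symm
    · obtain ⟨i, hi, hri⟩ := List.getElem_of_mem h1
      have hmono := PySem.List.sorted_id_getElem_mono xs (p := 1) (q := i + 2) (by omega) (by omega)
      have : b ≤ m := by simpa [hs, hri] using hmono
      exact hbm (le_antisymm this hmb)
  constructor
  · intro h1 hbm
    rw [hbm] at h1
    simp [List.count_cons_self] at h1
  · intro hbm
    have : m ∉ b :: r := hnotmem hbm
    simp [List.count_cons_self, List.count_eq_zero.2 this]

-- In a sorted list s = r ++ [c, L], the maximum L occurs once iff its neighbour c differs.
theorem pv_count_last (xs : List Int) (c L : Int) (r : List Int)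
    (hs : PySem.List.sorted xs (fun x => x) false = r ++ [c, L]) :
    (List.count L (r ++ [c, L]) = 1 ↔ c ≠ L) := by
  have hlen : (PySem.List.sorted xs (fun x => x) false).length = r.length + 2 := by
    rw [hs]; simp
  have hgc : (PySem.List.sorted xs (fun x => x) false)[r.length]'(by omega) = c := by
    simp [hs]
  have hgL : (PySem.List.sorted xs (fun x => x) false)[r.length + 1]'(by omega) = L := by
    simp [hs]
  have hcL : c ≤ L := by
    have := PySem.List.sorted_id_getElem_mono xs (p := r.length) (q := r.length + 1) (by omega) (by omega)
    rwa [hgc, hgL] at this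
  have hnotmem : c ≠ L → L ∉ r := by
    intro hc hmem
    obtain ⟨i, hi, hri⟩ := List.getElem_of_mem hmem
    have hmono := PySem.List.sorted_id_getElem_mono xs (p := i) (q := r.length) (by omega) (by omega)
    rw [hgc] at hmono
    have hgi : (PySem.List.sorted xs (fun x => x) false)[i]'(by omega) = L := by
      rw [List.getElem_of_eq hs, List.getElem_append_left (by omega)]; exact hri
    rw [hgi] at hmono
    exact hc (le_antisymm hcL hmono)
  have hcount : List.count L (r ++ [c, L]) = List.count L r + (if c = L then 1 else 0) + 1 := by
    simp [List.count_append, List.count_cons]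
    split_ifs <;> simp_all
  constructor
  · intro h1 hc
    rw [hcount, if_pos hc] at h1
    omega
  · intro hc
    rw [hcount, List.count_eq_zero.2 (hnotmem hc), if_neg hc]

theorem pv_exists_last (l : List Int) (h : l ≠ []) : ∃ l' b, l = l' ++ [b] := by
  induction l with
  | nil => exact absurd rfl h
  | cons x xs ih =>
      by_cases hxs : xs = []
      · exact ⟨[], x, by simp [hxs]⟩
      · obtain ⟨l', b, hl⟩ := ih hxs
        exact ⟨x :: l', b, by rw [hl]; rfl⟩

-- ===== VERDICT (by name: the statement is the Claim_ definition above) =====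
theorem biggest_lowest_spec : Claim_equal_biggest_lowest := by
  intro tab _hdom hpre
  unfold Spec_biggest_lowest
  obtain ⟨h, t, rfl⟩ := List.exists_cons_of_ne_nil hpre
  rcases t with _ | ⟨x, t⟩
  · -- singleton list
    simp [biggest_lowest, biggest_lowest_alt, pvEndsDistinct, PySem.List.sorted,
      PySem.List.insertBy, PySem.List.pyGet?, PySem.List.pyIdx?, PySem.List.count_eq]
  · -- length ≥ 2
    have hlen : (PySem.List.sorted (h :: x :: t) (fun y => y) false).length = t.length + 2 := by
      rw [PySem.List.length_sorted]; simp
    obtain ⟨m, b, s2, hs⟩ : ∃ m b s2,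
        PySem.List.sorted (h :: x :: t) (fun y => y) false = m :: b :: s2 := by
      rcases hq : PySem.List.sorted (h :: x :: t) (fun y => y) false with _ | ⟨m, _ | ⟨b, s2⟩⟩
      · rw [hq] at hlen; simp at hlen
      · rw [hq] at hlen; simp at hlen
      · exact ⟨m, b, s2, rfl⟩
    obtain ⟨s3, L, hL⟩ := pv_exists_last (m :: b :: s2) (by simp)
    have hs3 : s3 ≠ [] := by
      intro hnil; rw [hnil] at hL; simp at hL
    obtain ⟨s4, c, hc4⟩ := pv_exists_last s3 hs3
    have hs' : PySem.List.sorted (h :: x :: t) (fun y => y) false = s4 ++ [c, L] := by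
      rw [hs, hL, hc4]; simp
    have hlen4 : t.length = s4.length := by
      rw [hs'] at hlen; simp at hlen; omega
    have hperm : (m :: b :: s2).Perm (h :: x :: t) := by
      rw [← hs]; exact PySem.List.sorted_perm _ _ _
    have hperm' : (s4 ++ [c, L]).Perm (h :: x :: t) := by
      rw [← hs']; exact PySem.List.sorted_perm _ _ _
    -- the fold computes (min, max)
    have hm_le : ∀ y ∈ (h :: x :: t), m ≤ y := by
      have := PySem.List.key_head_sorted_le (h :: x :: t) (fun y => y) hs
      simpa using this
    have hm_mem : m ∈ (h :: x :: t) := hperm.mem_iff.1 (by simp)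
    have hlo_mem : (h :: x :: t).foldl min h ∈ (h :: x :: t) := by
      rcases pv_foldl_min_mem (h :: x :: t) h with h1 | h1
      · rw [h1]; simp
      · exact h1
    have hlo : (h :: x :: t).foldl min h = m :=
      le_antisymm (pv_foldl_min_le _ h m hm_mem) (hm_le _ hlo_mem)
    have hL_ge : ∀ y ∈ (h :: x :: t), y ≤ L := by
      intro y hy
      have hys : y ∈ PySem.List.sorted (h :: x :: t) (fun y => y) false :=
        (PySem.List.mem_sorted _ _ _ y).2 hy
      obtain ⟨i, hi, hgi⟩ := List.getElem_of_mem hys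
      have hmono := PySem.List.sorted_id_getElem_mono (h :: x :: t)
        (p := i) (q := s4.length + 1) (by omega) (by omega)
      have hgL : (PySem.List.sorted (h :: x :: t) (fun y => y) false)[s4.length + 1]'(by omega) = L := by
        rw [List.getElem_of_eq hs']
        rw [List.getElem_append_right (by omega)]
        simp
      rw [hgi, hgL] at hmono
      exact hmono
    have hL_mem : L ∈ (h :: x :: t) := hperm'.mem_iff.1 (by simp)
    have hhi_mem : (h :: x :: t).foldl max h ∈ (h :: x :: t) := by
      rcases pv_foldl_max_mem (h :: x :: t) h with h1 | h1
      · rw [h1]; simp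
      · exact h1
    have hhi : (h :: x :: t).foldl max h = L :=
      le_antisymm (hL_ge _ hhi_mem) (pv_foldl_max_ge _ h L hL_mem)
    -- counts transported to the sorted list
    have hcm : PySem.List.count (h :: x :: t) m = List.count m (m :: b :: s2) := by
      rw [PySem.List.count_eq]; exact (hperm.count_eq m).symm
    have hcL : PySem.List.count (h :: x :: t) L = List.count L (s4 ++ [c, L]) := by
      rw [PySem.List.count_eq]; exact (hperm'.count_eq L).symm
    have hcm_pos : 0 < List.count m (m :: b :: s2) := by simp
    have hcL_pos : 0 < List.count L (s4 ++ [c, L]) := by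
      apply List.count_pos_iff.2; simp
    have h1 := pv_count_head _ _ _ _ hs
    have h2 := pv_count_last _ _ _ _ hs'
    -- evaluate port A
    have hA : biggest_lowest (h :: x :: t) =
        decide (List.count m (m :: b :: s2) = List.count L (s4 ++ [c, L]) ∧
                List.count L (s4 ++ [c, L]) = 1) := by
      simp only [biggest_lowest, PySem.List.pyGet?_zero_cons]
      rw [pv_foldl_pair, hlo, hhi, hcm, hcL]
    -- evaluate port B on the sorted list, read at both ends
    have hg0 : PySem.List.pyGet? (m :: b :: s2) 0 = some m := PySem.List.pyGet?_zero_cons m _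
    have hg1 : PySem.List.pyGet? (m :: b :: s2) 1 = some b := by
      simp [PySem.List.pyGet?, PySem.List.pyIdx?]
    have hgm1 : PySem.List.pyGet? (s4 ++ [c, L]) (-1) = some L := by
      rw [PySem.List.pyGet?_neg_ofNat _ 1 (by omega) (by simp)]
      have e : (s4 ++ [c, L]).length - 1 = s4.length + 1 := by simp
      rw [e, List.getElem?_append_right (by omega)]
      simp
    have hgm2 : PySem.List.pyGet? (s4 ++ [c, L]) (-2) = some c := by
      rw [PySem.List.pyGet?_neg_ofNat _ 2 (by omega) (by simp)]
      have e : (s4 ++ [c, L]).length - 2 = s4.length := by simp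
      rw [e, List.getElem?_append_right (by omega)]
      simp
    have hB : biggest_lowest_alt (h :: x :: t) =
        ((!(m == b)) && (!(L == c))) := by
      simp only [biggest_lowest_alt, pvEndsDistinct]
      rw [show ((PySem.List.sorted (h :: x :: t) (fun y => y) false).length == 1) = false by
        simp [hlen]]
      conv_lhs => rw [hs', hgm1, hgm2, ← hs', hs, hg0, hg1]
      simp [bne]
    rw [hA, hB]
    by_cases hbm : b = m
    · have hnot : ¬(List.count m (m :: b :: s2) = List.count L (s4 ++ [c, L]) ∧
          List.count L (s4 ++ [c, L]) = 1) := by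
        rintro ⟨u, v⟩
        exact (h1.1 (by omega)) hbm
      rw [decide_eq_false hnot, hbm]
      simp
    · by_cases hcl : c = L
      · have hnot : ¬(List.count m (m :: b :: s2) = List.count L (s4 ++ [c, L]) ∧
            List.count L (s4 ++ [c, L]) = 1) := by
          rintro ⟨u, v⟩
          exact (h2.1 v) hcl
        rw [decide_eq_false hnot, hcl]
        simp
      · have e1 := h1.2 hbm
        have e2 := h2.2 hcl
        have em : (m == b) = false := by
          simp only [beq_eq_false_iff_ne]; exact fun e => hbm e.symm
        have ec : (L == c) = false := by
          simp only [beq_eq_false_iff_ne]; exact fun e => hcl e.symm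
        simp [e1, e2, em, ec]
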